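-- pv_equiv track=rewrite | github.com/abbasmollaei/P4THLS | pyhls/sys_utils.py | beautify_code
-- ===== SOURCE A (Python) =====
-- def beautify_code(code):
--     lines = code.splitlines()
--     beautified_code = []
--     indent_level = 0
--     indent_space = '    '  # 4 spaces for each indent level
--
--     for line in lines:
--         stripped_line = line.strip()
--
--         if stripped_line == '':
--             # Skip empty lines
--             continue
--
--         # If the line starts with a closing brace, reduce the indent level first
--         if stripped_line.startswith('}'):
--             indent_level -= 1
--
--         # Apply the indentation
--         beautified_line = f"{indent_space * indent_level}{stripped_line}"
--         beautified_code.append(beautified_line)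
--
--         # If the line ends with an opening brace, increase the indent level after applying the current indentation
--         if stripped_line.endswith('{'):
--             indent_level += 1
--
--     # Join the lines back with newline characters
--     return '\t' + '\n\t'.join(beautified_code)
-- ===== SOURCE B (Python) =====
-- def beautify_code(code):
--     # Pipeline: strip & drop blanks, compute open/close deltas, prefix-sum the
--     # indent levels, then render every line by zipping levels with the lines.
--     stripped = [s for ln in code.splitlines() if (s := ln.strip())]
--     closes = [s.startswith('}') for s in stripped]
--     opens = [s.endswith('{') for s in stripped]
--     totals = [0]
--     for o, c in zip(opens, closes):
--         totals.append(totals[-1] + o - c)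
--     beautified = ['    ' * (t - c) + s for t, c, s in zip(totals, closes, stripped)]
--     return '\t' + '\n\t'.join(beautified)
-- ===== Notes on version B (the rewrite author's own statement) =====
-- stated objective: alternative
-- what changed: B replaces A's single stateful loop (mutable indent level with in-loop skip of blanks and append) by a pipeline: strip-and-filter the lines, compute close/open delta lists, prefix-sum them into a totals list, and render each line by zipping totals with the deltas and lines.
import Mathlib
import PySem

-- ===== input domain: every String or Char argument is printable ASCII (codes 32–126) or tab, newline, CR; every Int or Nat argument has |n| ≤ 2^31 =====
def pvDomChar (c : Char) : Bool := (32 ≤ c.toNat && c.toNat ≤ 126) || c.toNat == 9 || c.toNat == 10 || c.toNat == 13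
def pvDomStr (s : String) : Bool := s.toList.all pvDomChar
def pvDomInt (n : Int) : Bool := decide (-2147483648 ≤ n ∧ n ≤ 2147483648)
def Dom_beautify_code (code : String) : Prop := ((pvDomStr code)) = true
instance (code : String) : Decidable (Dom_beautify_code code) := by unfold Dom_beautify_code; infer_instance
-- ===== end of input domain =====

-- B is an alternative, pipeline-style decomposition of A (strip/filter, delta lists,
-- prefix sums, zip-render); same O(n) cost, return value proved identical.

-- shared primitive: Python's 'str * int' (empty for n ≤ 0), exact
def pyStrMul (s : String) (n : Int) : String := String.ofList (PySem.List.pyRepeat s.toList n)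

-- ===== PORT A =====
def beautify_code (code : String) : String :=
  let lines := PySem.Str.splitlines code
  let st := lines.foldl (fun (st : List String × Int) line =>
      let stripped_line := PySem.Str.strip line
      if stripped_line = "" then st
      else
        let indent_level := if PySem.Str.startswith stripped_line "}" then st.2 - 1 else st.2
        let beautified_line := pyStrMul "    " indent_level ++ stripped_line
        let indent_level' := if PySem.Str.endswith stripped_line "{" then indent_level + 1 else indent_level
        (st.1 ++ [beautified_line], indent_level')) (([] : List String), (0 : Int))
  "\t" ++ PySem.Str.join "\n\t" st.1

-- ===== PORT B =====
-- B-side helper: a Python bool used in arithmetic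
def b2i (b : Bool) : Int := if b then 1 else 0

def beautify_code_alt (code : String) : String :=
  let stripped := ((PySem.Str.splitlines code).map PySem.Str.strip).filter (fun s => s ≠ "")
  let closes := stripped.map (fun s => PySem.Str.startswith s "}")
  let opens := stripped.map (fun s => PySem.Str.endswith s "{")
  let totals := (opens.zip closes).foldl
      (fun (ts : List Int) oc => ts ++ [((PySem.List.pyGet? ts (-1)).getD 0) + b2i oc.1 - b2i oc.2])
      [(0 : Int)]
  let beautified := (totals.zip (closes.zip stripped)).map
      (fun tcs => pyStrMul "    " (tcs.1 - b2i tcs.2.1) ++ tcs.2.2)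
  "\t" ++ PySem.Str.join "\n\t" beautified

-- ===== PRECONDITION & SPEC =====
def Spec_beautify_code (code : String) (out : String) : Prop := out = beautify_code_alt code
instance (code : String) (out : String) : Decidable (Spec_beautify_code code out) := by unfold Spec_beautify_code; infer_instance

-- ===== CLAIM (what is proved, stated in full; the proofs are below) =====
def Claim_equal_beautify_code : Prop := ∀ (code : String), Dom_beautify_code code → Spec_beautify_code code (beautify_code code)

-- ===== LEMMAS AND PROOFS =====

-- the rendered line list, as a structural recursion on the stripped lines
def renderA : Int → List String → List String
  | _, [] => []
  | lvl, s :: rest =>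
      let here := if PySem.Str.startswith s "}" then lvl - 1 else lvl
      (pyStrMul "    " here ++ s) :: renderA (if PySem.Str.endswith s "{" then here + 1 else here) rest

-- A's loop body, named (definitionally equal to the lambda in the port)
def stepA (st : List String × Int) (line : String) : List String × Int :=
  let stripped_line := PySem.Str.strip line
  if stripped_line = "" then st
  else
    let indent_level := if PySem.Str.startswith stripped_line "}" then st.2 - 1 else st.2
    let beautified_line := pyStrMul "    " indent_level ++ stripped_line
    let indent_level' := if PySem.Str.endswith stripped_line "{" then indent_level + 1 else indent_level
    (st.1 ++ [beautified_line], indent_level')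

-- B's totals-loop body, named (definitionally equal to the lambda in the port)
def stepT (ts : List Int) (oc : Bool × Bool) : List Int :=
  ts ++ [((PySem.List.pyGet? ts (-1)).getD 0) + b2i oc.1 - b2i oc.2]

-- B's totals list, tail after the seed, as structural recursion
def totalsAux : Int → List (Bool × Bool) → List Int
  | _, [] => []
  | t, (o, c) :: ps => (t + b2i o - b2i c) :: totalsAux (t + b2i o - b2i c) ps

theorem pyGet?_append_singleton_neg_one (ts : List Int) (v : Int) :
    PySem.List.pyGet? (ts ++ [v]) (-1) = some v := by
  simp [PySem.List.pyGet?, PySem.List.pyIdx?]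

theorem foldA (lines : List String) (acc : List String) (lvl : Int) :
    (lines.foldl stepA (acc, lvl)).1
    = acc ++ renderA lvl ((lines.map PySem.Str.strip).filter (fun s => s ≠ "")) := by
  induction lines generalizing acc lvl with
  | nil => simp [renderA]
  | cons l ls ih =>
    rw [List.foldl_cons]
    by_cases hp : PySem.Str.strip l = ""
    · rw [show stepA (acc, lvl) l = (acc, lvl) from by simp [stepA, hp]]
      rw [ih]
      simp [hp]
    · have here := if PySem.Str.startswith (PySem.Str.strip l) "}" then lvl - 1 else lvl
      rw [show stepA (acc, lvl) l =
          (acc ++ [pyStrMul "    " (if PySem.Str.startswith (PySem.Str.strip l) "}" then lvl - 1 else lvl)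
              ++ PySem.Str.strip l],
           if PySem.Str.endswith (PySem.Str.strip l) "{" then
             (if PySem.Str.startswith (PySem.Str.strip l) "}" then lvl - 1 else lvl) + 1
           else (if PySem.Str.startswith (PySem.Str.strip l) "}" then lvl - 1 else lvl)) from by
        simp only [stepA]
        rw [if_neg hp]]
      rw [ih]
      rw [List.map_cons,
        show List.filter (fun s => decide (s ≠ "")) (PySem.Str.strip l :: List.map PySem.Str.strip ls)
          = PySem.Str.strip l :: List.filter (fun s => decide (s ≠ "")) (List.map PySem.Str.strip ls) from by
            simp [hp]]
      simp [renderA]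

theorem foldT (ps : List (Bool × Bool)) (ts : List Int) (t : Int)
    (h : PySem.List.pyGet? ts (-1) = some t) :
    ps.foldl stepT ts = ts ++ totalsAux t ps := by
  induction ps generalizing ts t with
  | nil => simp [totalsAux]
  | cons p ps ih =>
    obtain ⟨o, c⟩ := p
    rw [List.foldl_cons, show stepT ts (o, c) = ts ++ [t + b2i o - b2i c] from by
      simp [stepT, h]]
    rw [ih (ts ++ [t + b2i o - b2i c]) (t + b2i o - b2i c) (pyGet?_append_singleton_neg_one ts _)]
    simp [totalsAux]

theorem renderB (stripped : List String) (t : Int) :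
    ((t :: totalsAux t (stripped.map (fun s => (PySem.Str.endswith s "{", PySem.Str.startswith s "}")))).zip
        ((stripped.map (fun s => PySem.Str.startswith s "}")).zip stripped)).map
      (fun tcs => pyStrMul "    " (tcs.1 - b2i tcs.2.1) ++ tcs.2.2)
    = renderA t stripped := by
  induction stripped generalizing t with
  | nil => simp [renderA]
  | cons s rest ih =>
    simp only [List.map_cons, totalsAux, List.zip_cons_cons, renderA]
    refine congrArg₂ _ ?_ ?_
    · cases hc : PySem.Str.startswith s "}" <;> simp [b2i, hc]
    · rw [← ih]
      cases hc : PySem.Str.startswith s "}" <;>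
        cases ho : PySem.Str.endswith s "{" <;>
          simp [b2i, hc, ho]

-- ===== VERDICT (by name: the statement is the Claim_ definition above) =====
set_option maxHeartbeats 1000000 in
theorem beautify_code_spec : Claim_equal_beautify_code := by
  intro code _
  show beautify_code code = beautify_code_alt code
  have hA : beautify_code code
      = "\t" ++ PySem.Str.join "\n\t" (renderA 0 (((PySem.Str.splitlines code).map PySem.Str.strip).filter (fun s => s ≠ ""))) := by
    show "\t" ++ PySem.Str.join "\n\t"
        (List.foldl stepA (([] : List String), (0 : Int)) (PySem.Str.splitlines code)).1 = _
    rw [foldA, List.nil_append]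
  have hB : beautify_code_alt code
      = "\t" ++ PySem.Str.join "\n\t" (renderA 0 (((PySem.Str.splitlines code).map PySem.Str.strip).filter (fun s => s ≠ ""))) := by
    show "\t" ++ PySem.Str.join "\n\t"
        (List.map (fun tcs => pyStrMul "    " (tcs.1 - b2i tcs.2.1) ++ tcs.2.2)
          ((List.foldl stepT [(0 : Int)]
              (((((PySem.Str.splitlines code).map PySem.Str.strip).filter (fun s => s ≠ "")).map (fun s => PySem.Str.endswith s "{")).zip
                ((((PySem.Str.splitlines code).map PySem.Str.strip).filter (fun s => s ≠ "")).map (fun s => PySem.Str.startswith s "}")))).zip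
            (((((PySem.Str.splitlines code).map PySem.Str.strip).filter (fun s => s ≠ "")).map (fun s => PySem.Str.startswith s "}")).zip (((PySem.Str.splitlines code).map PySem.Str.strip).filter (fun s => s ≠ ""))))) = _
    rw [List.zip_map', foldT _ _ 0 rfl, List.singleton_append, renderB]
  rw [hA, hB]
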